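-- pv_equiv track=rewrite | github.com/hellokayas/Some-Programming-Samples | robotband.py | count
-- ===== SOURCE A (Python) =====
-- def count(l1,l2,l3,l4,val):
--      count = 0
--      for i in l1:
--                for j in l2:
--                     for k in l3:
--                          for m in l4:
--                               ans = i ^ j ^ k ^ m
--                               if ans == val:
--                                    count  = count +1
--      return count
-- ===== SOURCE B (Python) =====
-- def count(l1, l2, l3, l4, val):
--     # meet-in-the-middle: count each XOR of an (l1, l2) pair once, then for every
--     # (l3, l4) pair look up how many (l1, l2) pairs complete it to val
--     pairs = {}
--     for i in l1:
--         for j in l2: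
--             x = i ^ j
--             pairs[x] = pairs.get(x, 0) + 1
--     total = 0
--     for k in l3:
--         for m in l4:
--             total += pairs.get(val ^ k ^ m, 0)
--     return total
-- ===== Notes on version B (the rewrite author's own statement) =====
-- stated objective: faster
-- what changed: Replaces the four nested loops by meet-in-the-middle: a dictionary counting the XOR of every (l1,l2) pair is built once, then each (l3,l4) pair looks up how many (l1,l2) pairs complete its XOR to val.
import Mathlib
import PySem

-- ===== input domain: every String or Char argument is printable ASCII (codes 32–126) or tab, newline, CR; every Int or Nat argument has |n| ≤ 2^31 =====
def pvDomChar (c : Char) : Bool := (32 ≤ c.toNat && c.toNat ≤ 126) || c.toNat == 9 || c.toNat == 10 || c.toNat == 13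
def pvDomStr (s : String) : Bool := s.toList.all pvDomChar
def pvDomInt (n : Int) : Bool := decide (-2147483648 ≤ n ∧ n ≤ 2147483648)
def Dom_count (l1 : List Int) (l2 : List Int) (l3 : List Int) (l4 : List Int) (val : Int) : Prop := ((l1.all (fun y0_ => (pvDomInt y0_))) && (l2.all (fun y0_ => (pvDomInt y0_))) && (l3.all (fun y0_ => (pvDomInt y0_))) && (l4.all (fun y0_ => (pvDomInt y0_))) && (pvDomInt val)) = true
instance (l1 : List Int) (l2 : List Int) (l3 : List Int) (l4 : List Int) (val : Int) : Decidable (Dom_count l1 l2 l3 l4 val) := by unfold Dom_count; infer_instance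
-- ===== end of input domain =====

-- B replaces A's four nested loops by meet-in-the-middle (a counting dictionary of
-- pairwise XORs of l1×l2, looked up from l3×l4): asymptotically faster.


-- ===== PORT A =====
def count (l1 : List Int) (l2 : List Int) (l3 : List Int) (l4 : List Int) (val : Int) : Int :=
  l1.foldl (fun c i =>
    l2.foldl (fun c j =>
      l3.foldl (fun c k =>
        l4.foldl (fun c m =>
          let ans := PySem.Int.bxor (PySem.Int.bxor (PySem.Int.bxor i j) k) m
          if ans == val then c + 1 else c) c) c) c) 0

-- ===== PORT B =====
def count_alt (l1 : List Int) (l2 : List Int) (l3 : List Int) (l4 : List Int) (val : Int) : Int :=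
  let pairs : PySem.Dict Int Int := l1.foldl (fun d i =>
    l2.foldl (fun d j =>
      let x := PySem.Int.bxor i j
      d.insert x (d.getD x 0 + 1)) d) PySem.Dict.empty
  l3.foldl (fun t k =>
    l4.foldl (fun t m =>
      t + pairs.getD (PySem.Int.bxor (PySem.Int.bxor val k) m) 0) t) 0

-- ===== PRECONDITION & SPEC =====
def Spec_count (l1 : List Int) (l2 : List Int) (l3 : List Int) (l4 : List Int) (val : Int) (out : Int) : Prop := out = count_alt l1 l2 l3 l4 val
instance (l1 : List Int) (l2 : List Int) (l3 : List Int) (l4 : List Int) (val : Int) (out : Int) : Decidable (Spec_count l1 l2 l3 l4 val out) := by unfold Spec_count; infer_instance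

-- ===== CLAIM (what is proved, stated in full; the proofs are below) =====
def Claim_equal_count : Prop := ∀ (l1 : List Int) (l2 : List Int) (l3 : List Int) (l4 : List Int) (val : Int), Dom_count l1 l2 l3 l4 val → Spec_count l1 l2 l3 l4 val (count l1 l2 l3 l4 val)

-- ===== LEMMAS AND PROOFS =====

-- xor algebra for PySem.Int.bxor
theorem pvBxorEqXor (a b : Int) : PySem.Int.bxor a b = Int.xor a b := by
  cases a <;> cases b <;> simp [PySem.Int.bxor, Int.xor] <;> omega

theorem pvBxorAssoc (a b c : Int) :
    PySem.Int.bxor (PySem.Int.bxor a b) c = PySem.Int.bxor a (PySem.Int.bxor b c) := by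
  simp only [pvBxorEqXor]
  cases a <;> cases b <;> cases c <;> simp [Int.xor, Nat.xor_assoc]

theorem pvBxorCancel (x m : Int) : PySem.Int.bxor (PySem.Int.bxor x m) m = x := by
  rw [pvBxorAssoc, PySem.Int.bxor_self, PySem.Int.bxor_zero]

theorem pvBxorEqIff (x y v : Int) : PySem.Int.bxor x y = v ↔ x = PySem.Int.bxor v y := by
  constructor
  · intro h; rw [← h, pvBxorCancel]
  · intro h; rw [h, pvBxorCancel]

-- the list of all pairwise XORs (proof-only helper)
def pvPairXors (l l' : List Int) : List Int := l.flatMap (fun a => l'.map (PySem.Int.bxor a))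

theorem pvPair (l l' : List Int) (g : Int → Int) :
    (l.map (fun a => (l'.map (fun b => g (PySem.Int.bxor a b))).sum)).sum
      = ((pvPairXors l l').map g).sum := by
  induction l with
  | nil => simp [pvPairXors]
  | cons a l ih =>
      simp only [pvPairXors, List.flatMap_cons, List.map_cons, List.sum_cons,
        List.map_append, List.sum_append, List.map_map] at *
      rw [ih]; rfl

theorem pvSwap {α β : Type} (l : List α) (l' : List β) (f : α → β → Int) :
    (l.map (fun a => (l'.map (fun b => f a b)).sum)).sum
      = (l'.map (fun b => (l.map (fun a => f a b)).sum)).sum := by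
  induction l with
  | nil => simp [List.map_const']
  | cons a l ih =>
      simp only [List.map_cons, List.sum_cons, ih, ← PySem.List.sum_map_add_int]

theorem pvIteAdd (b : Bool) (c : Int) : (if b then c + 1 else c) = c + (if b then 1 else 0) := by
  cases b <;> simp

-- for fixed y, the 0/1-sum over P is a count of the unique completing value
theorem pvCnt (P : List Int) (y v : Int) :
    (P.map (fun x => if PySem.Int.bxor x y == v then (1 : Int) else 0)).sum
      = (P.count (PySem.Int.bxor v y) : Int) := by
  rw [PySem.List.sum_map_ite_one_zero, List.count_eq_countP]
  congr 1
  apply List.countP_congr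
  intro x _
  simp only [beq_iff_eq]
  exact pvBxorEqIff x y v

-- A as a sum over the two pair-XOR lists
theorem pvAEq (l1 l2 l3 l4 : List Int) (val : Int) :
    count l1 l2 l3 l4 val
      = ((pvPairXors l3 l4).map
          (fun y => ((pvPairXors l1 l2).count (PySem.Int.bxor val y) : Int))).sum := by
  calc count l1 l2 l3 l4 val
      = (l1.map (fun i => (l2.map (fun j => (l3.map (fun k => (l4.map (fun m =>
          if PySem.Int.bxor (PySem.Int.bxor (PySem.Int.bxor i j) k) m == val then (1:Int)
          else 0)).sum)).sum)).sum)).sum := by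
        simp only [count, pvIteAdd, PySem.List.foldl_add, zero_add]
    _ = (l1.map (fun i => (l2.map (fun j => (l3.map (fun k => (l4.map (fun m =>
          if PySem.Int.bxor (PySem.Int.bxor i j) (PySem.Int.bxor k m) == val then (1:Int)
          else 0)).sum)).sum)).sum)).sum := by
        simp only [pvBxorAssoc]
    _ = (l1.map (fun i => (l2.map (fun j =>
          ((pvPairXors l3 l4).map (fun y =>
            if PySem.Int.bxor (PySem.Int.bxor i j) y == val then (1:Int) else 0)).sum)).sum)).sum := by
        apply congrArg List.sum
        apply List.map_congr_left; intro i _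
        apply congrArg List.sum
        apply List.map_congr_left; intro j _
        exact pvPair l3 l4 (fun y => if PySem.Int.bxor (PySem.Int.bxor i j) y == val then (1:Int) else 0)
    _ = ((pvPairXors l1 l2).map (fun x =>
          ((pvPairXors l3 l4).map (fun y =>
            if PySem.Int.bxor x y == val then (1:Int) else 0)).sum)).sum :=
        pvPair l1 l2 (fun x => ((pvPairXors l3 l4).map (fun y =>
          if PySem.Int.bxor x y == val then (1:Int) else 0)).sum)
    _ = ((pvPairXors l3 l4).map (fun y =>
          ((pvPairXors l1 l2).map (fun x =>
            if PySem.Int.bxor x y == val then (1:Int) else 0)).sum)).sum :=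
        pvSwap (pvPairXors l1 l2) (pvPairXors l3 l4)
          (fun x y => if PySem.Int.bxor x y == val then (1:Int) else 0)
    _ = _ := by simp only [pvCnt]

-- B as the same sum
theorem pvBEq (l1 l2 l3 l4 : List Int) (val : Int) :
    count_alt l1 l2 l3 l4 val
      = ((pvPairXors l3 l4).map
          (fun y => ((pvPairXors l1 l2).count (PySem.Int.bxor val y) : Int))).sum := by
  have hd : ∀ v : Int,
      (l1.foldl (fun d i => l2.foldl (fun d j =>
          d.insert (PySem.Int.bxor i j) (d.getD (PySem.Int.bxor i j) 0 + 1)) d)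
        (PySem.Dict.empty : PySem.Dict Int Int)).getD v 0
        = ((pvPairXors l1 l2).count v : Int) := by
    intro v
    have h : (l1.foldl (fun d i => l2.foldl (fun d j =>
          d.insert (PySem.Int.bxor i j) (d.getD (PySem.Int.bxor i j) 0 + 1)) d)
        (PySem.Dict.empty : PySem.Dict Int Int))
        = (pvPairXors l1 l2).foldl (fun d x => d.insert x (d.getD x 0 + 1)) PySem.Dict.empty := by
      simp [pvPairXors, List.foldl_flatMap, List.foldl_map]
    rw [h, PySem.Dict.getD_foldl_insert_add_one, PySem.Dict.getD_empty, zero_add]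
  calc count_alt l1 l2 l3 l4 val
      = (l3.map (fun k => (l4.map (fun m =>
          ((pvPairXors l1 l2).count
            (PySem.Int.bxor (PySem.Int.bxor val k) m) : Int))).sum)).sum := by
        simp only [count_alt, PySem.List.foldl_add, zero_add, hd]
    _ = (l3.map (fun k => (l4.map (fun m =>
          ((pvPairXors l1 l2).count
            (PySem.Int.bxor val (PySem.Int.bxor k m)) : Int))).sum)).sum := by
        simp only [pvBxorAssoc]
    _ = _ :=
        pvPair l3 l4 (fun y => ((pvPairXors l1 l2).count (PySem.Int.bxor val y) : Int))

-- ===== VERDICT (by name: the statement is the Claim_ definition above) =====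
theorem count_spec : Claim_equal_count := by
  intro l1 l2 l3 l4 val _
  unfold Spec_count
  rw [pvAEq, pvBEq]
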